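-- pv_equiv track=rewrite | github.com/charlienabarro/ads_coursework | q7.py | ThreePartition
-- ===== SOURCE A (Python) =====
-- def ThreePartition(L,P0,P1):
--     """Return a triple (L0,L1,L2) of sublists of L
--
--     L0 consists of all elements of L smaller or equal P0,
--     L1 of all elements of L larger than P0 but smaller or
--     equal P1, and L2 of all elements of L larger than P1
--     """
--     pre_P0=[]
--     between_P0_and_P1 = []
--     post_P2 = []
--
--     for number in L:
--         if number<=P0:
--             pre_P0.append(number)
--         elif P0<=number<=P1:
--             between_P0_and_P1.append(number)
--         else:
--             post_P2.append(number)
--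
--     return (pre_P0,between_P0_and_P1,post_P2)
-- ===== SOURCE B (Python) =====
-- def ThreePartition(L, P0, P1):
--     """Three independent filtering passes instead of one if/elif/else loop."""
--     return ([x for x in L if x <= P0],
--             [x for x in L if P0 < x <= P1],
--             [x for x in L if x > P0 and x > P1])
-- ===== Notes on version B (the rewrite author's own statement) =====
-- stated objective: simpler
-- what changed: Replaces the single accumulator loop with if/elif/else by three independent filter passes over L (with the L1 bound tightened to P0 < x <= P1 and the L2 filter to x > P0 and x > P1, which is what A's elif chain actually selects).
import Mathlib
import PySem

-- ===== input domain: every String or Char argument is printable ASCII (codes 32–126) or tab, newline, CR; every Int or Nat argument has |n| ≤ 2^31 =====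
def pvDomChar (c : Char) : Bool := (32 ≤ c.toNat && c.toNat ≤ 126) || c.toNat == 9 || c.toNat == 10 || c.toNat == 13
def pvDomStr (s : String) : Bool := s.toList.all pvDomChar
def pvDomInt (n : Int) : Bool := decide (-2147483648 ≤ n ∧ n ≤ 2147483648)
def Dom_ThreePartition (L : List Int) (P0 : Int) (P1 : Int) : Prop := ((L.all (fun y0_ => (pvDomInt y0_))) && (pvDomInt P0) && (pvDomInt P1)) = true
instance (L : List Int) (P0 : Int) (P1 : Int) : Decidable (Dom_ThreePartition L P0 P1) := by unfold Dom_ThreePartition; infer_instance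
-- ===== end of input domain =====

-- ===== PORT A =====
-- header: B replaces A's single if/elif/else accumulator loop by three independent filter passes (objective: simpler).
def ThreePartition (L : List Int) (P0 : Int) (P1 : Int) : List Int × List Int × List Int :=
  L.foldl
    (fun acc number =>
      if number ≤ P0 then (acc.1 ++ [number], acc.2.1, acc.2.2)
      else if P0 ≤ number ∧ number ≤ P1 then (acc.1, acc.2.1 ++ [number], acc.2.2)
      else (acc.1, acc.2.1, acc.2.2 ++ [number]))
    ([], [], [])

-- ===== PORT B =====
def ThreePartition_alt (L : List Int) (P0 : Int) (P1 : Int) : List Int × List Int × List Int :=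
  (L.filter (fun x => x ≤ P0),
   L.filter (fun x => P0 < x ∧ x ≤ P1),
   L.filter (fun x => P0 < x ∧ P1 < x))

-- ===== PRECONDITION & SPEC =====
def Spec_ThreePartition (L : List Int) (P0 : Int) (P1 : Int) (out : List Int × List Int × List Int) : Prop := out = ThreePartition_alt L P0 P1
instance (L : List Int) (P0 : Int) (P1 : Int) (out : List Int × List Int × List Int) : Decidable (Spec_ThreePartition L P0 P1 out) := by unfold Spec_ThreePartition; infer_instance

-- ===== CLAIM (what is proved, stated in full; the proofs are below) =====
def Claim_equal_ThreePartition : Prop := ∀ (L : List Int) (P0 : Int) (P1 : Int), Dom_ThreePartition L P0 P1 → Spec_ThreePartition L P0 P1 (ThreePartition L P0 P1)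

-- ===== LEMMAS AND PROOFS =====

theorem ThreePartition_foldl (P0 P1 : Int) (L : List Int) (a b c : List Int) :
    L.foldl
      (fun acc number =>
        if number ≤ P0 then (acc.1 ++ [number], acc.2.1, acc.2.2)
        else if P0 ≤ number ∧ number ≤ P1 then (acc.1, acc.2.1 ++ [number], acc.2.2)
        else (acc.1, acc.2.1, acc.2.2 ++ [number]))
      (a, b, c)
    = (a ++ L.filter (fun x => x ≤ P0),
       b ++ L.filter (fun x => P0 < x ∧ x ≤ P1),
       c ++ L.filter (fun x => P0 < x ∧ P1 < x)) := by
  induction L generalizing a b c with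
  | nil => simp
  | cons x xs ih =>
    by_cases h1 : x ≤ P0
    · simp only [List.foldl_cons, if_pos h1, ih, List.filter_cons]
      simp <;> omega
    · by_cases h2 : x ≤ P1
      · have h3 : (P0 ≤ x ∧ x ≤ P1) := by omega
        simp only [List.foldl_cons, if_neg h1, if_pos h3, ih, List.filter_cons]
        simp <;> omega
      · have h3 : ¬ (P0 ≤ x ∧ x ≤ P1) := by omega
        simp only [List.foldl_cons, if_neg h1, if_neg h3, ih, List.filter_cons]
        simp <;> omega

-- ===== VERDICT (by name: the statement is the Claim_ definition above) =====
theorem ThreePartition_spec : Claim_equal_ThreePartition := by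
  intro L P0 P1 _
  unfold Spec_ThreePartition ThreePartition ThreePartition_alt
  simpa using ThreePartition_foldl P0 P1 L [] [] []
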